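-- pv_equiv track=rewrite | github.com/wilmurillo-ai/Design-Assistant | .skills/openclaw-skills/skills/hughpyle/keep/keep/api.py | _truncate_ts
-- ===== SOURCE A (Python) =====
-- def _truncate_ts(ts: str) -> str:
--     """Normalize timestamp to canonical format: YYYY-MM-DDTHH:MM:SS.
--
--     New data is already in this format (via utc_now()). This handles
--     legacy timestamps that may have microseconds, 'Z', or '+00:00'.
--     """
--     # Strip fractional seconds
--     dot = ts.find(".", 19)
--     if dot != -1:
--         # Skip past digits to any tz suffix
--         end = dot
--         for i in range(dot + 1, len(ts)):
--             if ts[i] in "+-Z":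
--                 break
--         else:
--             i = len(ts)
--         ts = ts[:dot] + ts[i:] if i < len(ts) else ts[:dot]
--     # Strip timezone suffix — all timestamps are UTC by convention
--     if ts.endswith("+00:00"):
--         ts = ts[:-6]
--     elif ts.endswith("Z"):
--         ts = ts[:-1]
--     return ts
-- ===== SOURCE B (Python) =====
-- def _truncate_ts(ts: str) -> str:
--     # Single left-to-right pass: a 3-state machine (COPY / SKIP / DONE) emits
--     # characters, dropping the fractional-seconds run instead of locating and
--     # splicing it by index.
--     COPY, SKIP, DONE = 0, 1, 2
--     state = COPY
--     out = []
--     for pos, ch in enumerate(ts):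
--         if state == SKIP:
--             if ch in "+-Z":
--                 state = DONE
--                 out.append(ch)
--         elif state == COPY and ch == "." and pos >= 19:
--             state = SKIP
--         else:
--             out.append(ch)
--     s = "".join(out)
--     if s.endswith("+00:00"):
--         return s[:-6]
--     if s.endswith("Z"):
--         return s[:-1]
--     return s
-- ===== Notes on version B (the rewrite author's own statement) =====
-- stated objective: alternative
-- what changed: Replaces A's index search (find with start offset, a for/else scan for the timezone marker, and slice splicing of the whole string) by a single left-to-right pass: a three-state machine (copy / skip-fraction / done) that emits characters one by one and drops the fractional run as it streams by.
import Mathlib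
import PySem

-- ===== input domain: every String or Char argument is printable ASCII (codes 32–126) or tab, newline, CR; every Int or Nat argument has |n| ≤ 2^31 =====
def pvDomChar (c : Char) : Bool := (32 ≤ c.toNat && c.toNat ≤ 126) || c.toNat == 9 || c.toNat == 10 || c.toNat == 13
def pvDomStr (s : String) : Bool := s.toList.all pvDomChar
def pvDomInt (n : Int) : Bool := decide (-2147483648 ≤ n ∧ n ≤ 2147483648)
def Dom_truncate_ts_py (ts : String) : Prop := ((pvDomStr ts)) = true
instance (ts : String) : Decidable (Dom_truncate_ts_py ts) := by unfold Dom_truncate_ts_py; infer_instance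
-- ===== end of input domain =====

-- B replaces A's index search (find with a start offset, a for/else scan, slice splicing) by one
-- streaming left-to-right pass with a three-state machine emitting characters; objective:
-- alternative (same cost, no index arithmetic).

-- ===== PORT A =====
-- the loop "for i in range(dot+1, len(ts)): if ts[i] in '+-Z': break" with "else: i = len(ts)"
def pvScanA (cs : List Char) (i : Nat) : Nat :=
  if h : i < cs.length then
    if PySem.Chars.isIn [cs[i]] ['+', '-', 'Z'] then i else pvScanA cs (i + 1)
  else cs.length
termination_by cs.length - i

def truncate_ts_py (ts : String) : String :=
  let cs := ts.toList
  let dot := PySem.Str.findFrom ts "." 19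
  let cs1 :=
    if dot ≠ -1 then
      let i := pvScanA cs (dot + 1).toNat
      if (i : Int) < (cs.length : Int) then
        PySem.List.slice cs none (some dot) ++ PySem.List.slice cs (some (i : Int)) none
      else
        PySem.List.slice cs none (some dot)
    else cs
  let cs2 :=
    if PySem.Chars.endswith cs1 "+00:00".toList then PySem.List.slice cs1 none (some (-6))
    else if PySem.Chars.endswith cs1 ['Z'] then PySem.List.slice cs1 none (some (-1))
    else cs1
  String.ofList cs2

-- ===== PORT B =====
-- Source B's for-loop over enumerate(ts) with states COPY=0, SKIP=1, DONE=2
def pvEmit (cs : List Char) (pos : Nat) (state : Nat) : List Char :=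
  match cs with
  | [] => []
  | ch :: rest =>
    if state == 1 then
      if PySem.Chars.isIn [ch] ['+', '-', 'Z'] then ch :: pvEmit rest (pos + 1) 2
      else pvEmit rest (pos + 1) 1
    else if state == 0 && ch == '.' && decide (19 ≤ pos) then pvEmit rest (pos + 1) 1
    else ch :: pvEmit rest (pos + 1) state

def truncate_ts_py_alt (ts : String) : String :=
  let s := pvEmit ts.toList 0 0
  let s2 :=
    if PySem.Chars.endswith s "+00:00".toList then PySem.List.slice s none (some (-6))
    else if PySem.Chars.endswith s ['Z'] then PySem.List.slice s none (some (-1))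
    else s
  String.ofList s2

-- ===== PRECONDITION & SPEC =====
def Spec_truncate_ts_py (ts : String) (out : String) : Prop := out = truncate_ts_py_alt ts
instance (ts : String) (out : String) : Decidable (Spec_truncate_ts_py ts out) := by unfold Spec_truncate_ts_py; infer_instance

-- ===== CLAIM (what is proved, stated in full; the proofs are below) =====
def Claim_equal_truncate_ts_py : Prop := ∀ (ts : String), Dom_truncate_ts_py ts → Spec_truncate_ts_py ts (truncate_ts_py ts)

-- ===== LEMMAS AND PROOFS =====

-- membership in "+-Z" as a Bool predicate
def pvIsTz (c : Char) : Bool := c == '+' || c == '-' || c == 'Z'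

theorem pv_isIn_tz (c : Char) : PySem.Chars.isIn [c] ['+', '-', 'Z'] = pvIsTz c := by
  cases hb : PySem.Chars.isIn [c] ['+', '-', 'Z']
  · rw [PySem.Chars.isIn_eq_false_iff, List.singleton_infix_iff] at hb
    symm
    simp only [pvIsTz, Bool.or_eq_false_iff, beq_eq_false_iff_ne, ne_eq]
    simp at hb
    tauto
  · rw [PySem.Chars.isIn_iff_infix, List.singleton_infix_iff] at hb
    symm
    simp only [pvIsTz]
    simp at hb
    rcases hb with h | h | h <;> simp [h]

theorem pvScanA_eq (cs : List Char) (i : Nat) (h : i ≤ cs.length) :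
    pvScanA cs i = i + (cs.drop i).findIdx pvIsTz := by
  by_cases hi : i < cs.length
  · rw [pvScanA, dif_pos hi, pv_isIn_tz]
    have hd : cs.drop i = cs[i] :: cs.drop (i+1) := List.drop_eq_getElem_cons hi
    rw [hd, List.findIdx_cons]
    cases hc : pvIsTz cs[i]
    · simp only [Bool.false_eq_true, if_false, cond_false]
      rw [pvScanA_eq cs (i+1) (by omega)]; omega
    · simp
  · have : i = cs.length := by omega
    subst this
    rw [pvScanA, dif_neg (by omega)]
    simp
termination_by cs.length - i

theorem pv_prefix_singleton (c : Char) (l : List Char) : [c] <+: l ↔ l.head? = some c := by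
  cases l with
  | nil => simp
  | cons a t => simp [List.prefix_cons_iff, eq_comm]

theorem pv_find_singleton (r : List Char) (c : Char) :
    PySem.Chars.find r [c] = if c ∈ r then ((r.findIdx (· == c) : Nat) : Int) else -1 := by
  by_cases hc : c ∈ r
  · rw [if_pos hc]
    have h0 : 0 ≤ PySem.Chars.find r [c] := by
      rw [PySem.Chars.find_nonneg_iff, List.singleton_infix_iff]; exact hc
    obtain ⟨hpre, hmin⟩ := PySem.Chars.find_spec h0
    have hKlt : r.findIdx (· == c) < r.length := List.findIdx_lt_length.mpr ⟨c, hc, by simp⟩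
    have hgetK : (r[r.findIdx (· == c)]'hKlt == c) = true := by simpa using List.findIdx_getElem (p := fun x => x == c) (xs := r) (w := hKlt)
    set t := (PySem.Chars.find r [c]).toNat with ht
    set K := r.findIdx (· == c) with hK
    have h1 : t ≤ K := by
      by_contra hlt
      have : [c] <+: r.drop K := by
        rw [pv_prefix_singleton, List.head?_drop]
        rw [List.getElem?_eq_getElem hKlt]
        simpa using hgetK
      exact hmin K (by omega) this
    have h2 : ¬ t < K := by
      intro hlt
      rw [pv_prefix_singleton, List.head?_drop] at hpre
      have htlt : t < r.length := by omega
      rw [List.getElem?_eq_getElem htlt] at hpre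
      have := List.not_of_lt_findIdx (p := (· == c)) (by omega : t < K)
      simp at hpre this
      exact this hpre
    have : t = K := by omega
    omega
  · rw [if_neg hc, PySem.Chars.find_eq_neg_one_iff, List.singleton_infix_iff]
    exact hc

theorem pv_findFrom19 (ts : String) :
    PySem.Str.findFrom ts "." 19 =
      if PySem.Chars.find (ts.toList.drop 19) ['.'] = -1 then -1
      else 19 + PySem.Chars.find (ts.toList.drop 19) ['.'] := by
  by_cases h19 : 19 ≤ ts.toList.length
  · have := PySem.Chars.findFrom_natCast ts.toList ['.'] 19 h19
    rw [show ((19:Nat):Int) = (19:Int) from by norm_num] at this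
    simp [this]
  · have hd : ts.toList.drop 19 = [] := List.drop_eq_nil_of_le (by omega)
    rw [hd]
    have hf : PySem.Chars.find ([] : List Char) ['.'] = -1 := by decide
    rw [hf, if_pos rfl]
    simp only [PySem.Str.findFrom_eq]
    simp only [PySem.Chars.findFrom]
    rw [if_pos (by push_cast; omega)]

theorem pvEmit_done (cs : List Char) (pos : Nat) : pvEmit cs pos 2 = cs := by
  induction cs generalizing pos with
  | nil => rfl
  | cons c rest ih => simp [pvEmit, ih]

theorem pvEmit_skip (cs : List Char) (pos : Nat) :
    pvEmit cs pos 1 = cs.drop (cs.findIdx pvIsTz) := by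
  induction cs generalizing pos with
  | nil => rfl
  | cons c rest ih =>
    rw [List.findIdx_cons]
    cases hc : pvIsTz c
    · simp only [pvEmit, pv_isIn_tz, hc, cond_false, Bool.false_eq_true, if_false]
      rw [ih (pos + 1)]
      simp
    · simp only [pvEmit, pv_isIn_tz, hc, cond_true, if_true]
      rw [pvEmit_done]
      simp

theorem pvEmit_copy (cs : List Char) (pos : Nat) :
    pvEmit cs pos 0 =
      (if (19 - pos) + (cs.drop (19 - pos)).findIdx (· == '.') < cs.length then
         cs.take ((19 - pos) + (cs.drop (19 - pos)).findIdx (· == '.')) ++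
           (cs.drop ((19 - pos) + (cs.drop (19 - pos)).findIdx (· == '.') + 1)).drop
             ((cs.drop ((19 - pos) + (cs.drop (19 - pos)).findIdx (· == '.') + 1)).findIdx pvIsTz)
       else cs) := by
  induction cs generalizing pos with
  | nil => simp [pvEmit]
  | cons c rest ih =>
    by_cases hdot : c = '.' ∧ 19 ≤ pos
    · obtain ⟨hc, hpos⟩ := hdot
      have hm : 19 - pos = 0 := by omega
      rw [hm]
      simp only [List.drop_zero, List.findIdx_cons, hc]
      norm_num
      simp only [pvEmit]
      rw [if_neg (by decide), if_pos (by simp [hpos])]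
      rw [pvEmit_skip]
    · have hstep : pvEmit (c :: rest) pos 0 = c :: pvEmit rest (pos + 1) 0 := by
        simp only [pvEmit]
        rw [if_neg (by decide), if_neg (by
          simp only [Bool.and_eq_true, beq_iff_eq, decide_eq_true_eq]
          rintro ⟨⟨-, h1⟩, h2⟩
          exact hdot ⟨h1, h2⟩)]
      rw [hstep, ih (pos + 1)]
      -- relate the dot index of (c :: rest) at pos with that of rest at pos+1
      have hD : (19 - pos) + ((c :: rest).drop (19 - pos)).findIdx (· == '.')
          = ((19 - (pos + 1)) + (rest.drop (19 - (pos + 1))).findIdx (· == '.')) + 1 := by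
        by_cases hp : 19 ≤ pos
        · have hm : 19 - pos = 0 := by omega
          have hm' : 19 - (pos + 1) = 0 := by omega
          rw [hm, hm']
          simp only [List.drop_zero, List.findIdx_cons]
          have hc : (c == '.') = false := by
            simp only [beq_eq_false_iff_ne, ne_eq]
            intro h; exact hdot ⟨h, hp⟩
          rw [hc]
          simp
        · have hm : 19 - pos = (19 - (pos + 1)) + 1 := by omega
          rw [hm, List.drop_succ_cons]
          omega
      set D' := (19 - (pos + 1)) + (rest.drop (19 - (pos + 1))).findIdx (· == '.') with hD'
      rw [hD]
      by_cases hlt : D' < rest.length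
      · rw [if_pos hlt,
            if_pos (show D' + 1 < (c :: rest).length by simp only [List.length_cons]; omega)]
        rw [List.take_succ_cons, List.drop_succ_cons, List.cons_append]
      · rw [if_neg hlt,
            if_neg (show ¬ D' + 1 < (c :: rest).length by simp only [List.length_cons]; omega)]

theorem pv_middle_eq (ts : String) :
    (let cs := ts.toList
     let dot := PySem.Str.findFrom ts "." 19
     if dot ≠ -1 then
       let i := pvScanA cs (dot + 1).toNat
       if (i : Int) < (cs.length : Int) then
         PySem.List.slice cs none (some dot) ++ PySem.List.slice cs (some (i : Int)) none
       else PySem.List.slice cs none (some dot)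
     else cs) = pvEmit ts.toList 0 0 := by
  rw [pvEmit_copy, pv_findFrom19]
  set cs := ts.toList with hcs
  simp only [Nat.sub_zero]
  set f := PySem.Chars.find (cs.drop 19) ['.'] with hfdef
  have hfi := pv_find_singleton (cs.drop 19) '.'
  by_cases hmem : '.' ∈ cs.drop 19
  · rw [if_pos hmem] at hfi
    rw [← hfdef] at hfi
    set fI := (cs.drop 19).findIdx (· == '.') with hfI
    have hfIlt : fI < (cs.drop 19).length := List.findIdx_lt_length.mpr ⟨'.', hmem, by simp⟩
    have hlen : (cs.drop 19).length = cs.length - 19 := List.length_drop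
    have hlen19 : 19 < cs.length := by
      rcases Nat.lt_or_ge 19 cs.length with h | h
      · exact h
      · exfalso; rw [List.drop_eq_nil_of_le h] at hmem; simp at hmem
    have hD : 19 + fI < cs.length := by omega
    rw [hfi]
    rw [if_neg (show ¬((fI : Int) = -1) by omega)]
    rw [if_pos (show ((19 : Int) + (fI : Int)) ≠ -1 by omega)]
    have hdd : cs.drop (19 + fI + 1) = cs.drop (20 + fI) := by
      rw [show 19 + fI + 1 = 20 + fI from by omega]
    rw [if_pos hD, hdd]
    have hn : 20 + fI ≤ cs.length := by omega
    have htoNat : ((19 : Int) + (fI : Int) + 1).toNat = 20 + fI := by omega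
    rw [htoNat, pvScanA_eq cs _ hn]
    set K := (cs.drop (20 + fI)).findIdx pvIsTz with hK
    have hKle : K ≤ (cs.drop (20 + fI)).length := List.findIdx_le_length
    have hrlen : (cs.drop (20 + fI)).length = cs.length - (20 + fI) := List.length_drop
    have hdr : ∀ (l : List Char) (a b : Nat), (l.drop a).drop b = l.drop (a + b) := by
      intro l a b
      simp [List.drop_drop]
    by_cases hKlt : K < (cs.drop (20 + fI)).length
    · rw [if_pos (by push_cast; omega)]
      rw [PySem.List.slice_to _ (by positivity), PySem.List.slice_from _ (by positivity)]
      rw [hdr]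
      rw [show ((19 : Int) + (fI : Int)).toNat = 19 + fI from by omega]
      rw [show ((((20 + fI + K : Nat)) : Int)).toNat = 20 + fI + K from by omega]
    · rw [if_neg (by push_cast; omega)]
      rw [PySem.List.slice_to _ (by positivity)]
      rw [show ((19 : Int) + (fI : Int)).toNat = 19 + fI from by omega]
      have hKeq : K = (cs.drop (20 + fI)).length := by omega
      rw [hKeq, List.drop_length, List.append_nil]
  · rw [if_neg hmem] at hfi
    rw [← hfdef] at hfi
    rw [hfi, if_pos rfl]
    rw [if_neg (show ¬((-1 : Int) ≠ -1) by simp)]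
    have hfI : (cs.drop 19).findIdx (· == '.') = (cs.drop 19).length := by
      rw [List.findIdx_eq_length]
      intro x hx
      simp only [beq_eq_false_iff_ne, ne_eq]
      intro h; subst h; exact hmem hx
    rw [hfI, List.length_drop]
    rw [if_neg (by omega)]

-- ===== VERDICT (by name: the statement is the Claim_ definition above) =====
theorem truncate_ts_py_spec : Claim_equal_truncate_ts_py := by
  intro ts _
  unfold Spec_truncate_ts_py truncate_ts_py truncate_ts_py_alt
  have h := pv_middle_eq ts
  simp only [] at h ⊢
  rw [h]
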